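-- pv_equiv track=rewrite | github.com/SeungminKimdev/study-code | 백준/Gold/12100. 2048 （Easy）/2048 （Easy）.py | find_maximum_block
-- ===== SOURCE A (Python) =====
-- def find_maximum_block(size, board, depth):
--     if depth == 0:
--         return max(max(row) for row in board)
--
--     max_block = 0
--     for way in ['u', 'd', 'l', 'r']:
--         new_board = move(size, board, way)
--         max_block = max(max_block, find_maximum_block(size, new_board, depth - 1))
--
--     return max_block
--
-- def move(size, board, way):
--     new_board = [[0] * size for _ in range(size)]
--     if way == 'u': # up
--         for i in range(size):
--             now_block = 0 # setting block index
--             for j in range(size):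
--                 if board[j][i] == 0:
--                     continue
--                 if new_board[now_block][i] == 0:
--                     new_board[now_block][i] = board[j][i]
--                 elif new_board[now_block][i] == board[j][i]:
--                     new_board[now_block][i] *= 2
--                     now_block += 1
--                 else:
--                     now_block += 1
--                     new_board[now_block][i] = board[j][i]
--     elif way == 'd': # down
--         for i in range(size):
--             now_block = size-1 # setting block index
--             for j in range(size-1, -1, -1):
--                 if board[j][i] == 0:
--                     continue
--                 if new_board[now_block][i] == 0:
--                     new_board[now_block][i] = board[j][i]
--                 elif new_board[now_block][i] == board[j][i]:
--                     new_board[now_block][i] *= 2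
--                     now_block -= 1
--                 else:
--                     now_block -= 1
--                     new_board[now_block][i] = board[j][i]
--     elif way == 'l': # left
--         for i in range(size):
--             now_block = 0 # setting block index
--             for j in range(size):
--                 if board[i][j] == 0:
--                     continue
--                 if new_board[i][now_block] == 0:
--                     new_board[i][now_block] = board[i][j]
--                 elif new_board[i][now_block] == board[i][j]:
--                     new_board[i][now_block] *= 2
--                     now_block += 1
--                 else:
--                     now_block += 1
--                     new_board[i][now_block] = board[i][j]
--     elif way == 'r': # right
--         for i in range(size):
--             now_block = size-1 # setting block index
--             for j in range(size-1, -1, -1):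
--                 if board[i][j] == 0:
--                     continue
--                 if new_board[i][now_block] == 0:
--                     new_board[i][now_block] = board[i][j]
--                 elif new_board[i][now_block] == board[i][j]:
--                     new_board[i][now_block] *= 2
--                     now_block -= 1
--                 else:
--                     now_block -= 1
--                     new_board[i][now_block] = board[i][j]
--     else:
--         raise ValueError("Invalid move direction")
--     return new_board
-- ===== SOURCE B (Python) =====
-- def compress_line(line, size):
--     out = []
--     prev = None
--     for x in line:
--         if x == 0:
--             continue
--         if prev is None:
--             prev = x
--         elif prev == x:
--             out.append(2 * x)
--             prev = None
--         else:
--             out.append(prev)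
--             prev = x
--     if prev is not None:
--         out.append(prev)
--     return out + [0] * (size - len(out))
--
-- def move(size, board, way):
--     grid = [row[:size] for row in board[:size]]
--     if way == 'l':
--         return [compress_line(row, size) for row in grid]
--     if way == 'r':
--         return [compress_line(row[::-1], size)[::-1] for row in grid]
--     if way == 'u':
--         cols = [compress_line([grid[j][i] for j in range(size)], size)
--                 for i in range(size)]
--         return [[cols[i][j] for i in range(size)] for j in range(size)]
--     if way == 'd':
--         cols = [compress_line([grid[j][i] for j in range(size - 1, -1, -1)], size)
--                 for i in range(size)]
--         return [[cols[i][size - 1 - j] for i in range(size)] for j in range(size)]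
--     raise ValueError("Invalid move direction")
--
-- def find_maximum_block(size, board, depth):
--     if depth == 0:
--         return max(max(row) for row in board)
--     max_block = 0
--     for way in ['u', 'd', 'l', 'r']:
--         max_block = max(max_block, find_maximum_block(size, move(size, board, way), depth - 1))
--     return max_block
-- ===== Notes on version B (the rewrite author's own statement) =====
-- stated objective: simpler
-- what changed: move's four hand-unrolled in-place index-juggling loops over a preallocated grid are replaced by one compress_line helper (drop zeros, single merge-once scan, pad with zeros) applied to each line of the size x size grid, with reversal for down/right; the depth recursion is unchanged.
import Mathlib
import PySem

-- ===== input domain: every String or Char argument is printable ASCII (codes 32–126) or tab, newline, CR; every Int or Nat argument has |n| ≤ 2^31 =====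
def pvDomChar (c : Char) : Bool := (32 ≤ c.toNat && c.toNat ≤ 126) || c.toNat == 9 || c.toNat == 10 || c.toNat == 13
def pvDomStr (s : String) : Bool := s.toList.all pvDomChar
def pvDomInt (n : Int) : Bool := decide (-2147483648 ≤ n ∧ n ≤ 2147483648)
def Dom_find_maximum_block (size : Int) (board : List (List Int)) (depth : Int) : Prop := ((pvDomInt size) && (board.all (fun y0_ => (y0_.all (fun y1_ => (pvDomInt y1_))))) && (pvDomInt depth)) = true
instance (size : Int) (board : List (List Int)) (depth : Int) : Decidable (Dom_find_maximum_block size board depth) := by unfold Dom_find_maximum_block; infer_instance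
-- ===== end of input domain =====

-- B rewrites move: one compress_line helper (drop zeros, merge-once scan, pad) applied per
-- row/column (reversed for down/right) replaces A's four unrolled index-juggling loops; the
-- depth recursion is unchanged. Objective: simpler. Equality is about return values only
-- (neither Python mutates its arguments).

-- ===== PORT A =====
-- board[r][c] (defaults only fire outside Pre_-admitted indices)
def pvGet2 (b : List (List Int)) (r c : Int) : Int :=
  PySem.List.pyGetD (PySem.List.pyGetD b r []) c 0

-- board[r][c] = v
def pvSet2 (b : List (List Int)) (r c : Int) (v : Int) : List (List Int) :=
  PySem.List.pySetD b r (PySem.List.pySetD (PySem.List.pyGetD b r []) c v)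

-- body of A's inner loop for way == 'u' (state = (now_block, new_board))
def aStepU (board : List (List Int)) (i : Int) (s : Int × List (List Int)) (j : Int) :
    Int × List (List Int) :=
  if pvGet2 board j i = 0 then s
  else if pvGet2 s.2 s.1 i = 0 then (s.1, pvSet2 s.2 s.1 i (pvGet2 board j i))
  else if pvGet2 s.2 s.1 i = pvGet2 board j i then
    (s.1 + 1, pvSet2 s.2 s.1 i (pvGet2 s.2 s.1 i * 2))
  else (s.1 + 1, pvSet2 s.2 (s.1 + 1) i (pvGet2 board j i))

-- body of A's inner loop for way == 'd'
def aStepD (board : List (List Int)) (i : Int) (s : Int × List (List Int)) (j : Int) :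
    Int × List (List Int) :=
  if pvGet2 board j i = 0 then s
  else if pvGet2 s.2 s.1 i = 0 then (s.1, pvSet2 s.2 s.1 i (pvGet2 board j i))
  else if pvGet2 s.2 s.1 i = pvGet2 board j i then
    (s.1 + -1, pvSet2 s.2 s.1 i (pvGet2 s.2 s.1 i * 2))
  else (s.1 + -1, pvSet2 s.2 (s.1 + -1) i (pvGet2 board j i))

-- body of A's inner loop for way == 'l'
def aStepL (board : List (List Int)) (i : Int) (s : Int × List (List Int)) (j : Int) :
    Int × List (List Int) :=
  if pvGet2 board i j = 0 then s
  else if pvGet2 s.2 i s.1 = 0 then (s.1, pvSet2 s.2 i s.1 (pvGet2 board i j))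
  else if pvGet2 s.2 i s.1 = pvGet2 board i j then
    (s.1 + 1, pvSet2 s.2 i s.1 (pvGet2 s.2 i s.1 * 2))
  else (s.1 + 1, pvSet2 s.2 i (s.1 + 1) (pvGet2 board i j))

-- body of A's inner loop for way == 'r'
def aStepR (board : List (List Int)) (i : Int) (s : Int × List (List Int)) (j : Int) :
    Int × List (List Int) :=
  if pvGet2 board i j = 0 then s
  else if pvGet2 s.2 i s.1 = 0 then (s.1, pvSet2 s.2 i s.1 (pvGet2 board i j))
  else if pvGet2 s.2 i s.1 = pvGet2 board i j then
    (s.1 + -1, pvSet2 s.2 i s.1 (pvGet2 s.2 i s.1 * 2))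
  else (s.1 + -1, pvSet2 s.2 i (s.1 + -1) (pvGet2 board i j))

def moveA (size : Int) (board : List (List Int)) (way : String) : List (List Int) :=
  -- new_board = [[0] * size for _ in range(size)]
  let new0 := (PySem.List.pyRange 0 size 1).map (fun _ => PySem.List.pyRepeat [(0 : Int)] size)
  if way = "u" then
    (PySem.List.pyRange 0 size 1).foldl
      (fun nb i => ((PySem.List.pyRange 0 size 1).foldl (aStepU board i) ((0 : Int), nb)).2) new0
  else if way = "d" then
    (PySem.List.pyRange 0 size 1).foldl
      (fun nb i =>
        ((PySem.List.pyRange (size - 1) (-1) (-1)).foldl (aStepD board i) (size - 1, nb)).2) new0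
  else if way = "l" then
    (PySem.List.pyRange 0 size 1).foldl
      (fun nb i => ((PySem.List.pyRange 0 size 1).foldl (aStepL board i) ((0 : Int), nb)).2) new0
  else if way = "r" then
    (PySem.List.pyRange 0 size 1).foldl
      (fun nb i =>
        ((PySem.List.pyRange (size - 1) (-1) (-1)).foldl (aStepR board i) (size - 1, nb)).2) new0
  else new0  -- Python: raise ValueError (never reached from find_maximum_block)

-- max(xs) for nonempty xs (Python raises on []; empty rows are outside Pre_)
def pyMaxList (l : List Int) : Int :=
  match l with
  | [] => 0
  | x :: t => t.foldl max x

-- recursion with fuel = depth.toNat (Python's `depth == 0` test; negative depth, on which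
-- Python never terminates, is outside Pre_)
def fmbA : Nat → Int → List (List Int) → Int
  | 0, _size, board => pyMaxList (board.map pyMaxList)
  | fuel + 1, size, board =>
      ["u", "d", "l", "r"].foldl
        (fun mb way => max mb (fmbA fuel size (moveA size board way))) 0

def find_maximum_block (size : Int) (board : List (List Int)) (depth : Int) : Int :=
  fmbA depth.toNat size board

-- ===== PORT B =====
-- loop body of compress_line (state = (out, prev))
def clStep (s : List Int × Option Int) (x : Int) : List Int × Option Int :=
  if x = 0 then s
  else
    match s.2 with
    | none => (s.1, some x)
    | some p => if p = x then (s.1 ++ [2 * x], none) else (s.1 ++ [p], some x)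

def compressLine (line : List Int) (size : Int) : List Int :=
  let s := line.foldl clStep ([], none)
  let out := s.1 ++ (match s.2 with | none => ([] : List Int) | some p => [p])
  out ++ PySem.List.pyRepeat [(0 : Int)] (size - PySem.List.len out)

-- grid = [row[:size] for row in board[:size]]; row[::-1] is List.reverse
-- (PySem.List.slice_to / slice?_none_none_neg_one)
def moveB (size : Int) (board : List (List Int)) (way : String) : List (List Int) :=
  let grid := (PySem.List.slice board none (some size)).map
    (fun row => PySem.List.slice row none (some size))
  if way = "l" then grid.map (fun row => compressLine row size)
  else if way = "r" then grid.map (fun row => (compressLine row.reverse size).reverse)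
  else if way = "u" then
    let cols := (PySem.List.pyRange 0 size 1).map (fun i =>
      compressLine ((PySem.List.pyRange 0 size 1).map (fun j => pvGet2 grid j i)) size)
    (PySem.List.pyRange 0 size 1).map (fun j =>
      (PySem.List.pyRange 0 size 1).map (fun i =>
        PySem.List.pyGetD (PySem.List.pyGetD cols i []) j 0))
  else if way = "d" then
    let cols := (PySem.List.pyRange 0 size 1).map (fun i =>
      compressLine ((PySem.List.pyRange (size - 1) (-1) (-1)).map (fun j => pvGet2 grid j i)) size)
    (PySem.List.pyRange 0 size 1).map (fun j =>
      (PySem.List.pyRange 0 size 1).map (fun i =>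
        PySem.List.pyGetD (PySem.List.pyGetD cols i []) (size - 1 - j) 0))
  else board

def fmbB : Nat → Int → List (List Int) → Int
  | 0, _size, board => pyMaxList (board.map pyMaxList)
  | fuel + 1, size, board =>
      ["u", "d", "l", "r"].foldl
        (fun mb way => max mb (fmbB fuel size (moveB size board way))) 0

def find_maximum_block_alt (size : Int) (board : List (List Int)) (depth : Int) : Int :=
  fmbB depth.toNat size board

-- ===== PRECONDITION & SPEC =====
-- Pre_ excludes exactly the inputs on which A does not return: negative depth (A recurses
-- without bound), depth 0 with an empty board or an empty row (Python max raises ValueError),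
-- and depth >= 1 where size < 1 or the top-left size x size block is incomplete (IndexError,
-- or max over an empty board in the recursion).
def Pre_find_maximum_block (size : Int) (board : List (List Int)) (depth : Int) : Prop :=
  0 ≤ depth ∧
    ((depth = 0 ∧ board ≠ [] ∧ ∀ r ∈ board, r ≠ []) ∨
      (1 ≤ depth ∧ 1 ≤ size ∧ size ≤ (board.length : Int) ∧
        ∀ r ∈ board.take size.toNat, size ≤ (r.length : Int)))

instance (size : Int) (board : List (List Int)) (depth : Int) :
    Decidable (Pre_find_maximum_block size board depth) := by
  unfold Pre_find_maximum_block; infer_instance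

def pvWitness_find_maximum_block : Int × List (List Int) × Int := (2, [[2, 2], [0, 4]], 1)

def Spec_find_maximum_block (size : Int) (board : List (List Int)) (depth : Int) (out : Int) :
    Prop := out = find_maximum_block_alt size board depth

instance (size : Int) (board : List (List Int)) (depth : Int) (out : Int) :
    Decidable (Spec_find_maximum_block size board depth out) := by
  unfold Spec_find_maximum_block; infer_instance

-- ===== CLAIM (what is proved, stated in full; the proofs are below) =====
def Claim_equal_find_maximum_block : Prop := ∀ (size : Int) (board : List (List Int)) (depth : Int), Dom_find_maximum_block size board depth → Pre_find_maximum_block size board depth → Spec_find_maximum_block size board depth (find_maximum_block size board depth)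

-- ===== LEMMAS AND PROOFS =====

def plen (p : Option Int) : Nat := p.toList.length

def countNZ (xs : List Int) : Nat := xs.countP (fun x => decide (x ≠ 0))

def encode (n : Nat) (o : List Int) (p : Option Int) : List Int :=
  o ++ p.toList ++ List.replicate (n - (o.length + plen p)) 0

def genRow (δ : Int) (s : Int × List Int) (x : Int) : Int × List Int :=
  if x = 0 then s
  else if PySem.List.pyGetD s.2 s.1 0 = 0 then (s.1, PySem.List.pySetD s.2 s.1 x)
  else if PySem.List.pyGetD s.2 s.1 0 = x then
    (s.1 + δ, PySem.List.pySetD s.2 s.1 (PySem.List.pyGetD s.2 s.1 0 * 2))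
  else (s.1 + δ, PySem.List.pySetD s.2 (s.1 + δ) x)

lemma encode_none (n : Nat) (o : List Int) :
    encode n o none = o ++ List.replicate (n - o.length) 0 := by
  simp [encode, plen]

lemma encode_some (n : Nat) (o : List Int) (v : Int) :
    encode n o (some v) = o ++ v :: List.replicate (n - (o.length + 1)) 0 := by
  simp [encode, plen]

lemma countNZ_cons_nz {x : Int} (xs : List Int) (hx : x ≠ 0) :
    countNZ (x :: xs) = countNZ xs + 1 := by
  simp [countNZ, List.countP_cons, hx]

lemma countNZ_cons_zero (xs : List Int) : countNZ ((0 : Int) :: xs) = countNZ xs := by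
  simp [countNZ, List.countP_cons]

lemma clFold_spec : ∀ (xs : List Int) (o : List Int) (p : Option Int),
    (∀ v, p = some v → v ≠ 0) →
    (∀ v, (xs.foldl clStep (o, p)).2 = some v → v ≠ 0) ∧
      (xs.foldl clStep (o, p)).1.length + plen (xs.foldl clStep (o, p)).2 ≤
        o.length + plen p + countNZ xs := by
  intro xs
  induction xs with
  | nil => intro o p hp; exact ⟨hp, by simp [countNZ]⟩
  | cons x xs ih =>
    intro o p hp
    rw [List.foldl_cons]
    by_cases hx : x = 0
    · subst hx
      have h0 : clStep (o, p) 0 = (o, p) := by simp [clStep]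
      rw [h0]
      have h := ih o p hp
      exact ⟨h.1, by have := h.2; rw [countNZ_cons_zero]; omega⟩
    · rw [countNZ_cons_nz xs hx]
      cases p with
      | none =>
        have h0 : clStep (o, none) x = (o, some x) := by simp [clStep, hx]
        rw [h0]
        have h := ih o (some x) (by intro v hv; cases hv; exact hx)
        exact ⟨h.1, by have := h.2; simp [plen] at this ⊢; omega⟩
      | some v =>
        by_cases hvx : v = x
        · have h0 : clStep (o, some v) x = (o ++ [2 * x], none) := by simp [clStep, hx, hvx]
          rw [h0]
          have h := ih (o ++ [2 * x]) none (by intro v hv; cases hv)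
          exact ⟨h.1, by have := h.2; simp [plen] at this ⊢; omega⟩
        · have h0 : clStep (o, some v) x = (o ++ [v], some x) := by simp [clStep, hx, hvx]
          rw [h0]
          have h := ih (o ++ [v]) (some x) (by intro v hv; cases hv; exact hx)
          exact ⟨h.1, by have := h.2; simp [plen] at this ⊢; omega⟩

lemma state_simL (n : Nat) : ∀ (xs : List Int) (o : List Int) (p : Option Int),
    (∀ v, p = some v → v ≠ 0) → o.length + plen p + countNZ xs ≤ n →
    xs.foldl (genRow 1) ((o.length : Int), encode n o p)
      = (((xs.foldl clStep (o, p)).1.length : Int),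
         encode n (xs.foldl clStep (o, p)).1 (xs.foldl clStep (o, p)).2) := by
  intro xs
  induction xs with
  | nil => intro o p _ _; simp
  | cons x xs ih =>
    intro o p hp hb
    rw [List.foldl_cons, List.foldl_cons]
    by_cases hx : x = 0
    · subst hx
      have h1 : genRow 1 ((o.length : Int), encode n o p) 0 = ((o.length : Int), encode n o p) := by
        unfold genRow; rw [if_pos rfl]
      have h2 : clStep (o, p) 0 = (o, p) := by simp [clStep]
      rw [h1, h2]
      exact ih o p hp (by rw [countNZ_cons_zero] at hb; omega)
    · rw [countNZ_cons_nz xs hx] at hb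
      cases p with
      | none =>
        have hb' : o.length + countNZ xs + 1 ≤ n := by simpa [plen] using hb
        have hlt : o.length < n := by omega
        have hread : PySem.List.pyGetD (encode n o none) (o.length : Int) 0 = 0 := by
          rw [encode_none, PySem.List.pyGetD_natCast, List.getD_eq_getElem?_getD,
            List.getElem?_append_right (Nat.le_refl _), Nat.sub_self, List.getElem?_replicate]
          simp [Nat.sub_pos_of_lt hlt]
        have hwrite : PySem.List.pySetD (encode n o none) (o.length : Int) x
            = encode n o (some x) := by
          rw [encode_none, encode_some, PySem.List.pySetD_natCast,
            List.set_append_right _ _ (Nat.le_refl _), Nat.sub_self]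
          congr 1
          have h3 : n - o.length = (n - (o.length + 1)) + 1 := by omega
          rw [h3, List.replicate_succ, List.set_cons_zero]
        have h1 : genRow 1 ((o.length : Int), encode n o none) x
            = ((o.length : Int), encode n o (some x)) := by
          unfold genRow
          rw [if_neg hx, hread, if_pos rfl, hwrite]
        have h2 : clStep (o, none) x = (o, some x) := by simp [clStep, hx]
        rw [h1, h2]
        exact ih o (some x) (by intro v hv; cases hv; exact hx)
          (by simp [plen]; omega)
      | some v =>
        have hv0 : v ≠ 0 := hp v rfl
        have hb' : o.length + 1 + countNZ xs + 1 ≤ n := by simpa [plen] using hb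
        have hread : PySem.List.pyGetD (encode n o (some v)) (o.length : Int) 0 = v := by
          rw [encode_some, PySem.List.pyGetD_natCast, List.getD_eq_getElem?_getD,
            List.getElem?_append_right (Nat.le_refl _), Nat.sub_self]
          simp
        by_cases hvx : v = x
        · have hwrite : PySem.List.pySetD (encode n o (some v)) (o.length : Int) (v * 2)
              = encode n (o ++ [2 * x]) none := by
            rw [encode_some, encode_none, PySem.List.pySetD_natCast,
              List.set_append_right _ _ (Nat.le_refl _), Nat.sub_self, List.set_cons_zero]
            subst hvx
            simp [mul_comm]
          have h1 : genRow 1 ((o.length : Int), encode n o (some v)) x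
              = (((o ++ [2 * x]).length : Int), encode n (o ++ [2 * x]) none) := by
            unfold genRow
            rw [if_neg hx, hread, if_neg hv0, if_pos hvx, hwrite]
            simp
          have h2 : clStep (o, some v) x = (o ++ [2 * x], none) := by
            simp [clStep, hx, hvx]
          rw [h1, h2]
          exact ih (o ++ [2 * x]) none (by intro v hv; cases hv)
            (by simp [plen]; omega)
        · have hwrite : PySem.List.pySetD (encode n o (some v)) ((o.length : Int) + 1) x
              = encode n (o ++ [v]) (some x) := by
            have hc : ((o.length : Int) + 1) = ((o.length + 1 : Nat) : Int) := by push_cast; ring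
            rw [encode_some, encode_some, hc, PySem.List.pySetD_natCast,
              List.set_append_right _ _ (by simp)]
            simp only [List.length_append, List.length_cons]
            have h3 : o.length + 1 - o.length = 1 := by omega
            rw [h3]
            have h4 : n - (o.length + 1) = (n - (o.length + 2)) + 1 := by omega
            rw [h4, List.replicate_succ]
            simp only [List.set_cons_succ, List.set_cons_zero]
            simp
          have h1 : genRow 1 ((o.length : Int), encode n o (some v)) x
              = (((o ++ [v]).length : Int), encode n (o ++ [v]) (some x)) := by
            unfold genRow
            rw [if_neg hx, hread, if_neg hv0, if_neg hvx, hwrite]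
            simp
          have h2 : clStep (o, some v) x = (o ++ [v], some x) := by
            simp [clStep, hx, hvx]
          rw [h1, h2]
          exact ih (o ++ [v]) (some x) (by intro v hv; cases hv; exact hx)
            (by simp [plen]; omega)

lemma repl_split (m : Nat) (a : Int) (t : List Int) :
    List.replicate (m + 1) a ++ t = List.replicate m a ++ ([a] ++ t) := by
  rw [List.replicate_succ', List.append_assoc]

lemma rev_encode_none (n : Nat) (o : List Int) :
    (encode n o none).reverse = List.replicate (n - o.length) 0 ++ o.reverse := by
  rw [encode_none]; simp

lemma rev_encode_some (n : Nat) (o : List Int) (v : Int) :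
    (encode n o (some v)).reverse
      = List.replicate (n - (o.length + 1)) 0 ++ (v :: o.reverse) := by
  rw [encode_some]; simp

lemma state_simR (n : Nat) : ∀ (xs : List Int) (o : List Int) (p : Option Int),
    (∀ v, p = some v → v ≠ 0) → o.length + plen p + countNZ xs ≤ n →
    xs.foldl (genRow (-1)) ((n : Int) - 1 - o.length, (encode n o p).reverse)
      = ((n : Int) - 1 - ((xs.foldl clStep (o, p)).1.length : Int),
         (encode n (xs.foldl clStep (o, p)).1 (xs.foldl clStep (o, p)).2).reverse) := by
  intro xs
  induction xs with
  | nil => intro o p _ _; simp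
  | cons x xs ih =>
    intro o p hp hb
    rw [List.foldl_cons, List.foldl_cons]
    by_cases hx : x = 0
    · subst hx
      have h1 : genRow (-1) ((n : Int) - 1 - o.length, (encode n o p).reverse) 0
          = ((n : Int) - 1 - o.length, (encode n o p).reverse) := by
        unfold genRow; rw [if_pos rfl]
      have h2 : clStep (o, p) 0 = (o, p) := by simp [clStep]
      rw [h1, h2]
      exact ih o p hp (by rw [countNZ_cons_zero] at hb; omega)
    · rw [countNZ_cons_nz xs hx] at hb
      cases p with
      | none =>
        have hb' : o.length + countNZ xs + 1 ≤ n := by simpa [plen] using hb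
        have hidx : (n : Int) - 1 - (o.length : Int) = ((n - 1 - o.length : Nat) : Int) := by
          push_cast; omega
        have hsplit : n - o.length = (n - 1 - o.length) + 1 := by omega
        have hrev : (encode n o none).reverse
            = List.replicate (n - 1 - o.length) 0 ++ ([(0 : Int)] ++ o.reverse) := by
          rw [rev_encode_none, hsplit, repl_split]
        have hread : PySem.List.pyGetD ((encode n o none).reverse)
            ((n : Int) - 1 - (o.length : Int)) 0 = 0 := by
          rw [hidx, PySem.List.pyGetD_natCast, hrev, List.getD_eq_getElem?_getD,
            List.getElem?_append_right (by simp), List.length_replicate, Nat.sub_self]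
          simp
        have hwrite : PySem.List.pySetD ((encode n o none).reverse)
            ((n : Int) - 1 - (o.length : Int)) x = (encode n o (some x)).reverse := by
          rw [hidx, PySem.List.pySetD_natCast, hrev,
            List.set_append_right _ _ (by simp), List.length_replicate, Nat.sub_self,
            rev_encode_some]
          have : n - 1 - o.length = n - (o.length + 1) := by omega
          rw [this]
          simp
        have h1 : genRow (-1) ((n : Int) - 1 - o.length, (encode n o none).reverse) x
            = ((n : Int) - 1 - o.length, (encode n o (some x)).reverse) := by
          unfold genRow
          rw [if_neg hx, hread, if_pos rfl, hwrite]
        have h2 : clStep (o, none) x = (o, some x) := by simp [clStep, hx]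
        rw [h1, h2]
        exact ih o (some x) (by intro v hv; cases hv; exact hx)
          (by simp [plen]; omega)
      | some v =>
        have hv0 : v ≠ 0 := hp v rfl
        have hb' : o.length + 1 + countNZ xs + 1 ≤ n := by simpa [plen] using hb
        have hidx : (n : Int) - 1 - (o.length : Int) = ((n - (o.length + 1) : Nat) : Int) := by
          push_cast; omega
        have hrev : (encode n o (some v)).reverse
            = List.replicate (n - (o.length + 1)) 0 ++ (v :: o.reverse) :=
          rev_encode_some n o v
        have hread : PySem.List.pyGetD ((encode n o (some v)).reverse)
            ((n : Int) - 1 - (o.length : Int)) 0 = v := by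
          rw [hidx, PySem.List.pyGetD_natCast, hrev, List.getD_eq_getElem?_getD,
            List.getElem?_append_right (by simp), List.length_replicate, Nat.sub_self]
          simp
        by_cases hvx : v = x
        · have hwrite : PySem.List.pySetD ((encode n o (some v)).reverse)
              ((n : Int) - 1 - (o.length : Int)) (v * 2) = (encode n (o ++ [2 * x]) none).reverse := by
            rw [hidx, PySem.List.pySetD_natCast, hrev,
              List.set_append_right _ _ (by simp), List.length_replicate, Nat.sub_self,
              List.set_cons_zero, rev_encode_none]
            subst hvx
            simp [mul_comm]
          have h1 : genRow (-1) ((n : Int) - 1 - o.length, (encode n o (some v)).reverse) x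
              = ((n : Int) - 1 - ((o ++ [2 * x]).length : Int),
                 (encode n (o ++ [2 * x]) none).reverse) := by
            unfold genRow
            rw [if_neg hx, hread, if_neg hv0, if_pos hvx, hwrite]
            have : (n : Int) - 1 - ((o ++ [2 * x]).length : Int) = (n : Int) - 1 - o.length + -1 := by
              simp; push_cast; ring
            rw [this]
          have h2 : clStep (o, some v) x = (o ++ [2 * x], none) := by
            simp [clStep, hx, hvx]
          rw [h1, h2]
          exact ih (o ++ [2 * x]) none (by intro v hv; cases hv)
            (by simp [plen]; omega)
        · have hidx2 : (n : Int) - 1 - (o.length : Int) + -1 = ((n - (o.length + 2) : Nat) : Int) := by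
            push_cast; omega
          have hsplit2 : n - (o.length + 1) = (n - (o.length + 2)) + 1 := by omega
          have hrev2 : (encode n o (some v)).reverse
              = List.replicate (n - (o.length + 2)) 0 ++ ([(0 : Int)] ++ (v :: o.reverse)) := by
            rw [hrev, hsplit2, repl_split]
          have hwrite : PySem.List.pySetD ((encode n o (some v)).reverse)
              ((n : Int) - 1 - (o.length : Int) + -1) x = (encode n (o ++ [v]) (some x)).reverse := by
            rw [hidx2, PySem.List.pySetD_natCast, hrev2,
              List.set_append_right _ _ (by simp), List.length_replicate, Nat.sub_self,
              rev_encode_some]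
            simp
          have h1 : genRow (-1) ((n : Int) - 1 - o.length, (encode n o (some v)).reverse) x
              = ((n : Int) - 1 - ((o ++ [v]).length : Int),
                 (encode n (o ++ [v]) (some x)).reverse) := by
            unfold genRow
            rw [if_neg hx, hread, if_neg hv0, if_neg hvx, hwrite]
            have : (n : Int) - 1 - ((o ++ [v]).length : Int) = (n : Int) - 1 - o.length + -1 := by
              simp; push_cast; ring
            rw [this]
          have h2 : clStep (o, some v) x = (o ++ [v], some x) := by
            simp [clStep, hx, hvx]
          rw [h1, h2]
          exact ih (o ++ [v]) (some x) (by intro v hv; cases hv; exact hx)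
            (by simp [plen]; omega)

@[simp] lemma plen_none : plen (none : Option Int) = 0 := rfl

@[simp] lemma plen_some (v : Int) : plen (some v) = 1 := rfl

lemma compress_encode (n : Nat) (xs : List Int) (h : countNZ xs ≤ n) :
    compressLine xs (n : Int)
      = encode n (xs.foldl clStep ([], none)).1 (xs.foldl clStep ([], none)).2 := by
  have hs := clFold_spec xs [] none (by intro v hv; cases hv)
  have hb := hs.2
  simp only [plen_none, List.length_nil, Nat.zero_add] at hb
  rcases hf : xs.foldl clStep ([], none) with ⟨o2, p2⟩
  rw [hf] at hb
  unfold compressLine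
  rw [hf]
  cases p2 with
  | none =>
    rw [encode_none]
    simp only [plen_none, Nat.add_zero] at hb
    simp [PySem.List.pyRepeat_singleton, PySem.List.len_eq]
  | some v =>
    rw [encode_some]
    simp only [plen_some] at hb
    simp [PySem.List.pyRepeat_singleton, PySem.List.len_eq]
    congr 1
    omega

lemma encode_length (n : Nat) (o : List Int) (p : Option Int)
    (h : o.length + plen p ≤ n) : (encode n o p).length = n := by
  simp [encode, plen] at h ⊢
  omega

lemma compress_len (n : Nat) (xs : List Int) (h : countNZ xs ≤ n) :
    (compressLine xs (n : Int)).length = n := by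
  rw [compress_encode n xs h]
  apply encode_length
  have hs := clFold_spec xs [] none (by intro v hv; cases hv)
  have hb := hs.2
  simp only [plen_none, List.length_nil, Nat.zero_add] at hb
  omega

def gen2DRow (δ : Int) (board : List (List Int)) (i : Int) (s : Int × List (List Int)) (j : Int) :
    Int × List (List Int) :=
  if pvGet2 board i j = 0 then s
  else if pvGet2 s.2 i s.1 = 0 then (s.1, pvSet2 s.2 i s.1 (pvGet2 board i j))
  else if pvGet2 s.2 i s.1 = pvGet2 board i j then
    (s.1 + δ, pvSet2 s.2 i s.1 (pvGet2 s.2 i s.1 * 2))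
  else (s.1 + δ, pvSet2 s.2 i (s.1 + δ) (pvGet2 board i j))

def gen2DCol (δ : Int) (board : List (List Int)) (i : Int) (s : Int × List (List Int)) (j : Int) :
    Int × List (List Int) :=
  if pvGet2 board j i = 0 then s
  else if pvGet2 s.2 s.1 i = 0 then (s.1, pvSet2 s.2 s.1 i (pvGet2 board j i))
  else if pvGet2 s.2 s.1 i = pvGet2 board j i then
    (s.1 + δ, pvSet2 s.2 s.1 i (pvGet2 s.2 s.1 i * 2))
  else (s.1 + δ, pvSet2 s.2 (s.1 + δ) i (pvGet2 board j i))

lemma row_read (NB : List (List Int)) (k : Nat) (row : List Int) (hk : k < NB.length)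
    (c : Int) : pvGet2 (NB.set k row) (k : Int) c = PySem.List.pyGetD row c 0 := by
  unfold pvGet2
  congr 1
  rw [PySem.List.pyGetD_natCast, List.getD_eq_getElem?_getD, List.getElem?_set_self (by omega)]
  rfl

lemma row_write (NB : List (List Int)) (k : Nat) (row : List Int) (hk : k < NB.length)
    (c : Int) (v : Int) :
    pvSet2 (NB.set k row) (k : Int) c v = NB.set k (PySem.List.pySetD row c v) := by
  unfold pvSet2
  have h1 : PySem.List.pyGetD (NB.set k row) (k : Int) [] = row := by
    rw [PySem.List.pyGetD_natCast, List.getD_eq_getElem?_getD,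
      List.getElem?_set_self (by omega)]
    rfl
  rw [h1, PySem.List.pySetD_natCast, List.set_set]

lemma loc_row (δ : Int) (board : List (List Int)) (k : Nat) (NB : List (List Int))
    (hk : k < NB.length) : ∀ (js : List Int) (nb : Int) (row : List Int),
    js.foldl (gen2DRow δ board (k : Int)) (nb, NB.set k row)
      = ((js.foldl (fun s j => genRow δ s (pvGet2 board (k : Int) j)) (nb, row)).1,
         NB.set k (js.foldl (fun s j => genRow δ s (pvGet2 board (k : Int) j)) (nb, row)).2) := by
  intro js
  induction js with
  | nil => intro nb row; simp
  | cons j js ih =>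
    intro nb row
    rw [List.foldl_cons, List.foldl_cons]
    have hstep : gen2DRow δ board (k : Int) (nb, NB.set k row) j
        = ((genRow δ (nb, row) (pvGet2 board (k : Int) j)).1,
           NB.set k (genRow δ (nb, row) (pvGet2 board (k : Int) j)).2) := by
      simp only [gen2DRow, genRow, row_read NB k row hk, row_write NB k row hk]
      split_ifs <;> rfl
    rw [hstep]
    rcases hg : genRow δ (nb, row) (pvGet2 board (k : Int) j) with ⟨nb', row'⟩
    exact ih nb' row'

lemma pyIdx?_lt {n : Nat} {i : Int} {m : Nat} (h : PySem.List.pyIdx? n i = some m) : m < n := by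
  unfold PySem.List.pyIdx? at h
  split_ifs at h with h1 h2 h3
  · injection h with h'; omega
  · injection h with h'; omega

lemma pyIdx?_lt' {α : Type} {xs : List α} {i : Int} {m : Nat}
    (h : PySem.List.pyIdx? xs.length i = some m) : m < xs.length := pyIdx?_lt h

def colGetD (NB : List (List Int)) (k : Nat) : List Int := NB.map (fun r => r.getD k 0)

def applyCol (NB : List (List Int)) (k : Nat) (col : List Int) : List (List Int) :=
  (List.range NB.length).map (fun j => (NB.getD j []).set k (col.getD j 0))

lemma applyCol_length (NB : List (List Int)) (k : Nat) (col : List Int) :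
    (applyCol NB k col).length = NB.length := by simp [applyCol]

lemma applyCol_getElem (NB : List (List Int)) (k : Nat) (col : List Int) (j : Nat)
    (hj : j < NB.length) :
    (applyCol NB k col)[j]'(by rw [applyCol_length]; exact hj)
      = (NB[j]'hj).set k (col.getD j 0) := by
  simp [applyCol, List.getD_eq_getElem?_getD, List.getElem?_eq_getElem hj]

lemma applyCol_self (NB : List (List Int)) (k : Nat) (hrows : ∀ r ∈ NB, k < r.length) :
    applyCol NB k (colGetD NB k) = NB := by
  apply List.ext_getElem (by simp [applyCol_length])
  intro j h1 h2
  rw [applyCol_getElem NB k _ j h2]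
  have hk : k < NB[j].length := hrows _ (List.getElem_mem h2)
  simp [colGetD, List.getD_eq_getElem?_getD, List.getElem?_eq_getElem h2,
    List.getElem?_eq_getElem hk]

lemma pyGetD_of_idx_none {α : Type} (xs : List α) (i : Int) (d : α)
    (h : PySem.List.pyIdx? xs.length i = none) : PySem.List.pyGetD xs i d = d := by
  unfold PySem.List.pyGetD PySem.List.pyGet?
  rw [h]
  rfl

lemma pyGetD_of_idx_some {α : Type} (xs : List α) (i : Int) (d : α) (m : Nat)
    (h : PySem.List.pyIdx? xs.length i = some m) :
    PySem.List.pyGetD xs i d = xs[m]'(pyIdx?_lt' h) := by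
  unfold PySem.List.pyGetD PySem.List.pyGet?
  rw [h]
  simp [List.getElem?_eq_getElem (pyIdx?_lt' h)]

lemma pySetD_of_idx_none {α : Type} (xs : List α) (i : Int) (v : α)
    (h : PySem.List.pyIdx? xs.length i = none) : PySem.List.pySetD xs i v = xs := by
  unfold PySem.List.pySetD PySem.List.pySet?
  rw [h]
  rfl

lemma pySetD_of_idx_some {α : Type} (xs : List α) (i : Int) (v : α) (m : Nat)
    (h : PySem.List.pyIdx? xs.length i = some m) : PySem.List.pySetD xs i v = xs.set m v := by
  unfold PySem.List.pySetD PySem.List.pySet?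
  rw [h]
  rfl

lemma col_read (NB : List (List Int)) (k : Nat) (col : List Int)
    (hlen : col.length = NB.length) (hrows : ∀ r ∈ NB, k < r.length) (nb : Int) :
    pvGet2 (applyCol NB k col) nb (k : Int) = PySem.List.pyGetD col nb 0 := by
  unfold pvGet2
  rcases h : PySem.List.pyIdx? col.length nb with _ | m
  · have hX : PySem.List.pyIdx? (applyCol NB k col).length nb = none := by
      rw [applyCol_length, ← hlen]; exact h
    rw [pyGetD_of_idx_none _ _ _ hX, pyGetD_of_idx_none col nb 0 h]
    simp
  · have hm : m < col.length := pyIdx?_lt h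
    have hmN : m < NB.length := by omega
    have hX : PySem.List.pyIdx? (applyCol NB k col).length nb = some m := by
      rw [applyCol_length, ← hlen]; exact h
    rw [pyGetD_of_idx_some _ _ _ _ hX, pyGetD_of_idx_some col nb 0 m h,
      applyCol_getElem NB k col m hmN]
    have hk : k < (NB[m]'hmN).length := hrows _ (List.getElem_mem hmN)
    rw [PySem.List.pyGetD_natCast, List.getD_eq_getElem?_getD,
      List.getElem?_set_self (by omega)]
    simp [List.getD_eq_getElem?_getD, List.getElem?_eq_getElem hm]

lemma col_write (NB : List (List Int)) (k : Nat) (col : List Int)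
    (hlen : col.length = NB.length) (nb : Int) (v : Int) :
    pvSet2 (applyCol NB k col) nb (k : Int) v = applyCol NB k (PySem.List.pySetD col nb v) := by
  unfold pvSet2
  rcases h : PySem.List.pyIdx? col.length nb with _ | m
  · have hX : PySem.List.pyIdx? (applyCol NB k col).length nb = none := by
      rw [applyCol_length, ← hlen]; exact h
    rw [pySetD_of_idx_none _ _ _ hX, pySetD_of_idx_none col nb v h]
  · have hm : m < col.length := pyIdx?_lt h
    have hmN : m < NB.length := by omega
    have hX : PySem.List.pyIdx? (applyCol NB k col).length nb = some m := by
      rw [applyCol_length, ← hlen]; exact h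
    rw [pyGetD_of_idx_some _ _ _ _ hX, applyCol_getElem NB k col m hmN,
      PySem.List.pySetD_natCast, List.set_set, pySetD_of_idx_some _ _ _ _ hX,
      pySetD_of_idx_some col nb v m h]
    apply List.ext_getElem (by simp [applyCol_length])
    intro j hj1 hj2
    rw [List.getElem_set]
    have hjN : j < NB.length := by
      rw [List.length_set, applyCol_length] at hj1; omega
    rw [applyCol_getElem NB k _ j hjN]
    by_cases hjm : m = j
    · subst hjm
      rw [applyCol_getElem NB k (col.set m v) m hjN]
      simp [List.getD_eq_getElem?_getD, List.getElem?_set_self hm]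
    · rw [if_neg hjm, applyCol_getElem NB k (col.set m v) j hjN]
      simp [List.getD_eq_getElem?_getD, List.getElem?_set_ne hjm]

lemma loc_col (δ : Int) (board : List (List Int)) (k : Nat) (NB : List (List Int))
    (hrows : ∀ r ∈ NB, k < r.length) : ∀ (js : List Int) (nb : Int) (col : List Int),
    col.length = NB.length →
    js.foldl (gen2DCol δ board (k : Int)) (nb, applyCol NB k col)
      = ((js.foldl (fun s j => genRow δ s (pvGet2 board j (k : Int))) (nb, col)).1,
         applyCol NB k (js.foldl (fun s j => genRow δ s (pvGet2 board j (k : Int))) (nb, col)).2) := by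
  intro js
  induction js with
  | nil => intro nb col _; simp
  | cons j js ih =>
    intro nb col hlen
    rw [List.foldl_cons, List.foldl_cons]
    have hstep : gen2DCol δ board (k : Int) (nb, applyCol NB k col) j
        = ((genRow δ (nb, col) (pvGet2 board j (k : Int))).1,
           applyCol NB k (genRow δ (nb, col) (pvGet2 board j (k : Int))).2) := by
      simp only [gen2DCol, genRow, col_read NB k col hlen hrows, col_write NB k col hlen]
      split_ifs <;> rfl
    rw [hstep]
    rcases hg : genRow δ (nb, col) (pvGet2 board j (k : Int)) with ⟨nb', col'⟩
    have hlen' : col'.length = NB.length := by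
      have : col'.length = col.length := by
        have := congrArg (fun s => s.2.length) hg
        simp at this
        rw [← this]
        unfold genRow
        split_ifs <;> simp [PySem.List.length_pySetD]
      omega
    have := ih nb' col' hlen'
    exact this

lemma pyGetD_getElem' {α : Type} (xs : List α) (k : Nat) (d : α) (hk : k < xs.length) :
    PySem.List.pyGetD xs (k : Int) d = xs[k] := by
  rw [PySem.List.pyGetD_natCast, List.getD_eq_getElem?_getD, List.getElem?_eq_getElem hk]
  rfl

lemma board_getD (board : List (List Int)) (m : Nat) (hm : m < board.length) :
    board.getD m [] = board[m]'hm := by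
  rw [List.getD_eq_getElem?_getD, List.getElem?_eq_getElem hm]
  rfl

lemma countNZ_le (xs : List Int) : countNZ xs ≤ xs.length := List.countP_le_length ..

lemma countNZ_reverse (xs : List Int) : countNZ xs.reverse = countNZ xs := by
  simp [countNZ, List.countP_reverse]

lemma colGetD_length (board : List (List Int)) (k : Nat) :
    (colGetD board k).length = board.length := by simp [colGetD]

def Zg (n : Nat) : List (List Int) := List.replicate n (List.replicate n 0)

lemma Zg_getD (n : Nat) (j : Nat) (hj : j < n) :
    (Zg n).getD j [] = List.replicate n 0 := by
  unfold Zg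
  rw [List.getD_replicate _ hj]

lemma pyRange_rev (n : Nat) :
    PySem.List.pyRange ((n : Int) - 1) (-1) (-1) = (PySem.List.pyRange 0 (n : Int) 1).reverse := by
  have h := PySem.List.pyRange_neg_one_eq_reverse ((n : Int) - 1) (-1)
  simp only [neg_add_cancel, sub_add_cancel] at h
  exact h

def Tg (n : Nat) (board : List (List Int)) : List (List Int) :=
  (board.take n).map (fun r => r.take n)

lemma Tg_length (n : Nat) (board : List (List Int)) (h1 : n ≤ board.length) :
    (Tg n board).length = n := by
  simp [Tg]
  omega

lemma Tg_getElem (n : Nat) (board : List (List Int)) (m : Nat) (hm : m < n)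
    (h1 : n ≤ board.length) :
    (Tg n board)[m]'(by rw [Tg_length n board h1]; omega)
      = (board[m]'(by omega)).take n := by
  simp [Tg, List.getElem_take]

lemma Tg_getD (n : Nat) (board : List (List Int)) (m : Nat) (hm : m < n)
    (h1 : n ≤ board.length) :
    (Tg n board).getD m [] = (board.getD m []).take n := by
  rw [board_getD (Tg n board) m (by rw [Tg_length n board h1]; omega),
    board_getD board m (by omega), Tg_getElem n board m hm h1]


lemma mem_take_getElem (n : Nat) (board : List (List Int)) (m : Nat) (hm : m < n)
    (h1 : n ≤ board.length) : (board[m]'(by omega)) ∈ board.take n := by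
  have hlt : m < (board.take n).length := by rw [List.length_take]; omega
  have : (board.take n)[m]'hlt = board[m]'(by omega) := List.getElem_take
  rw [← this]
  exact List.getElem_mem hlt

lemma map_vals_row_take (board : List (List Int)) (k n : Nat) (hk : k < n)
    (h1 : n ≤ board.length) (hrow : n ≤ (board[k]'(by omega)).length) :
    (PySem.List.pyRange 0 (n : Int) 1).map (fun j => pvGet2 board (k : Int) j)
      = (board[k]'(by omega)).take n := by
  apply List.ext_getElem
    (by rw [List.length_map, PySem.List.length_pyRange_one, List.length_take]; omega)
  intro j hj1 hj2
  have hjn : j < n := by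
    rw [List.length_map, PySem.List.length_pyRange_one] at hj1; omega
  rw [List.getElem_map, PySem.List.getElem_pyRange_one]
  unfold pvGet2
  rw [zero_add, pyGetD_getElem' board k [] (by omega),
    pyGetD_getElem' _ j 0 (by omega), List.getElem_take]

lemma foldl_vals_row (δ : Int) (board : List (List Int)) (k n : Nat) (hk : k < n)
    (h1 : n ≤ board.length) (hrow : n ≤ (board[k]'(by omega)).length)
    (init : Int × List Int) :
    (PySem.List.pyRange 0 (n : Int) 1).foldl
        (fun s j => genRow δ s (pvGet2 board (k : Int) j)) init
      = ((board[k]'(by omega)).take n).foldl (genRow δ) init := by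
  rw [← List.foldl_map (f := fun j => pvGet2 board (k : Int) j) (g := genRow δ),
    map_vals_row_take board k n hk h1 hrow]

lemma foldl_vals_row_rev (δ : Int) (board : List (List Int)) (k n : Nat) (hk : k < n)
    (h1 : n ≤ board.length) (hrow : n ≤ (board[k]'(by omega)).length)
    (init : Int × List Int) :
    (PySem.List.pyRange ((n : Int) - 1) (-1) (-1)).foldl
        (fun s j => genRow δ s (pvGet2 board (k : Int) j)) init
      = (((board[k]'(by omega)).take n).reverse).foldl (genRow δ) init := by
  rw [pyRange_rev n,
    ← List.foldl_map (f := fun j => pvGet2 board (k : Int) j) (g := genRow δ),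
    List.map_reverse, map_vals_row_take board k n hk h1 hrow]

lemma map_vals_col_take (board : List (List Int)) (k n : Nat) (hk : k < n)
    (h1 : n ≤ board.length) (h2 : ∀ r ∈ board.take n, n ≤ r.length) :
    (PySem.List.pyRange 0 (n : Int) 1).map (fun j => pvGet2 board j (k : Int))
      = colGetD (Tg n board) k := by
  apply List.ext_getElem
    (by
      rw [List.length_map, PySem.List.length_pyRange_one]
      rw [colGetD_length, Tg_length n board h1]
      omega)
  intro j hj1 hj2
  have hjn : j < n := by
    rw [List.length_map, PySem.List.length_pyRange_one] at hj1; omega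
  rw [List.getElem_map, PySem.List.getElem_pyRange_one, zero_add]
  unfold pvGet2 colGetD
  have hjb : j < board.length := by omega
  have hrow : n ≤ (board[j]'hjb).length := h2 _ (mem_take_getElem n board j hjn h1)
  rw [pyGetD_getElem' board j [] hjb, pyGetD_getElem' _ k 0 (by omega)]
  rw [List.getElem_map]
  rw [Tg_getElem n board j hjn h1]
  rw [List.getD_eq_getElem?_getD,
    List.getElem?_eq_getElem (by rw [List.length_take]; omega), Option.getD_some,
    List.getElem_take]

lemma foldl_vals_col (δ : Int) (board : List (List Int)) (k n : Nat) (hk : k < n)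
    (h1 : n ≤ board.length) (h2 : ∀ r ∈ board.take n, n ≤ r.length)
    (init : Int × List Int) :
    (PySem.List.pyRange 0 (n : Int) 1).foldl
        (fun s j => genRow δ s (pvGet2 board j (k : Int))) init
      = (colGetD (Tg n board) k).foldl (genRow δ) init := by
  rw [← List.foldl_map (f := fun j => pvGet2 board j (k : Int)) (g := genRow δ),
    map_vals_col_take board k n hk h1 h2]

lemma foldl_vals_col_rev (δ : Int) (board : List (List Int)) (k n : Nat) (hk : k < n)
    (h1 : n ≤ board.length) (h2 : ∀ r ∈ board.take n, n ≤ r.length)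
    (init : Int × List Int) :
    (PySem.List.pyRange ((n : Int) - 1) (-1) (-1)).foldl
        (fun s j => genRow δ s (pvGet2 board j (k : Int))) init
      = ((colGetD (Tg n board) k).reverse).foldl (genRow δ) init := by
  rw [pyRange_rev n,
    ← List.foldl_map (f := fun j => pvGet2 board j (k : Int)) (g := genRow δ),
    List.map_reverse, map_vals_col_take board k n hk h1 h2]

lemma map_vals_col (board : List (List Int)) (k n : Nat) (hb : board.length = n) :
    (PySem.List.pyRange 0 (n : Int) 1).map (fun j => pvGet2 board j (k : Int))
      = colGetD board k := by
  unfold pvGet2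
  have h1 : (fun (j : Int) => PySem.List.pyGetD (PySem.List.pyGetD board j []) (k : Int) 0)
      = (fun r => PySem.List.pyGetD r (k : Int) 0) ∘ (fun j => PySem.List.pyGetD board j []) := rfl
  rw [h1, ← List.map_map]
  have h2 := PySem.List.map_pyGetD_pyRange_zero board ([] : List Int)
  rw [PySem.List.len_eq, hb] at h2
  rw [h2]
  unfold colGetD
  apply List.map_congr_left
  intro r _
  rw [PySem.List.pyGetD_natCast]

lemma grid_eta_row (n : Nat) (NB : List (List Int)) (hlen : NB.length = n) :
    (List.range n).map (fun i => NB.getD i []) = NB := by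
  apply List.ext_getElem (by simp [hlen])
  intro j h1 h2
  simp [List.getD_eq_getElem?_getD, List.getElem?_eq_getElem h2]

lemma grid_eta (n : Nat) (NB : List (List Int)) (hlen : NB.length = n)
    (hrows : ∀ r ∈ NB, r.length = n) :
    (List.range n).map (fun j => (List.range n).map (fun i => (NB.getD j []).getD i 0)) = NB := by
  apply List.ext_getElem (by simp [hlen])
  intro j h1 h2
  simp only [List.getElem_map, List.getElem_range]
  have hrow : NB.getD j [] = NB[j] := by
    simp [List.getD_eq_getElem?_getD, List.getElem?_eq_getElem h2]
  rw [hrow]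
  have hrl : NB[j].length = n := hrows _ (List.getElem_mem h2)
  apply List.ext_getElem (by simp [hrl])
  intro i g1 g2
  simp [List.getD_eq_getElem?_getD, List.getElem?_eq_getElem g2]

lemma outer_rows (n : Nat) (F : List (List Int) → Int → List (List Int)) (G : Nat → List Int)
    (hF : ∀ (m : Nat) (NB : List (List Int)), m < n → NB.length = n →
      NB.getD m [] = List.replicate n 0 → F NB (m : Int) = NB.set m (G m)) :
    ∀ (d m : Nat) (NB : List (List Int)), n - m = d → m ≤ n → NB.length = n →
    (∀ j : Nat, m ≤ j → j < n → NB.getD j [] = List.replicate n 0) →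
    (PySem.List.pyRange (m : Int) (n : Int) 1).foldl F NB
      = (List.range n).map (fun i => if i < m then NB.getD i [] else G i) := by
  intro d
  induction d with
  | zero =>
    intro m NB hd hm hlen _
    have hmn : m = n := by omega
    subst hmn
    rw [PySem.List.pyRange_one_eq_nil (le_refl _), List.foldl_nil]
    have hc : (List.range m).map (fun i => if i < m then NB.getD i [] else G i)
        = (List.range m).map (fun i => NB.getD i []) :=
      List.map_congr_left (fun i hi => if_pos (List.mem_range.mp hi))
    rw [hc, grid_eta_row m NB hlen]
  | succ d ih =>
    intro m NB hd hm hlen hzero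
    have hmn : m < n := by omega
    rw [PySem.List.pyRange_one_cons (by exact_mod_cast hmn), List.foldl_cons]
    rw [hF m NB hmn hlen (hzero m (le_refl _) hmn)]
    have hcast : ((m : Int) + 1) = ((m + 1 : Nat) : Int) := by push_cast; ring
    rw [hcast]
    rw [ih (m + 1) (NB.set m (G m)) (by omega) (by omega) (by simp [hlen])
      (by
        intro j hj1 hj2
        rw [List.getD_eq_getElem?_getD, List.getElem?_set_ne (by omega)]
        rw [← List.getD_eq_getElem?_getD]
        exact hzero j (by omega) hj2)]
    apply List.map_congr_left
    intro i hi
    have hin : i < n := List.mem_range.mp hi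
    by_cases h1 : i < m
    · rw [if_pos (by omega), if_pos h1, List.getD_eq_getElem?_getD,
        List.getElem?_set_ne (by omega), ← List.getD_eq_getElem?_getD]
    · by_cases h2 : i = m
      · subst h2
        rw [if_pos (by omega), if_neg (by omega), List.getD_eq_getElem?_getD,
          List.getElem?_set_self (by omega)]
        rfl
      · rw [if_neg (by omega), if_neg (by omega)]

lemma outer_cols (n : Nat) (F : List (List Int) → Int → List (List Int)) (CC : Nat → List Int)
    (hF : ∀ (m : Nat) (NB : List (List Int)), m < n → NB.length = n →
      (∀ r ∈ NB, r.length = n) → colGetD NB m = List.replicate n 0 →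
      F NB (m : Int) = applyCol NB m (CC m)) :
    ∀ (d m : Nat) (NB : List (List Int)), n - m = d → m ≤ n → NB.length = n →
    (∀ r ∈ NB, r.length = n) →
    (∀ j i : Nat, j < n → m ≤ i → i < n → (NB.getD j []).getD i 0 = 0) →
    (PySem.List.pyRange (m : Int) (n : Int) 1).foldl F NB
      = (List.range n).map (fun j => (List.range n).map (fun i =>
          if i < m then (NB.getD j []).getD i 0 else (CC i).getD j 0)) := by
  intro d
  induction d with
  | zero =>
    intro m NB hd hm hlen hrows _
    have hmn : m = n := by omega
    subst hmn
    rw [PySem.List.pyRange_one_eq_nil (le_refl _), List.foldl_nil]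
    have hc : (List.range m).map (fun j => (List.range m).map (fun i =>
          if i < m then (NB.getD j []).getD i 0 else (CC i).getD j 0))
        = (List.range m).map (fun j => (List.range m).map (fun i =>
          (NB.getD j []).getD i 0)) :=
      List.map_congr_left (fun j _ =>
        List.map_congr_left (fun i hi => if_pos (List.mem_range.mp hi)))
    rw [hc, grid_eta m NB hlen hrows]
  | succ d ih =>
    intro m NB hd hm hlen hrows hzero
    have hmn : m < n := by omega
    have hcol : colGetD NB m = List.replicate n 0 := by
      apply List.ext_getElem (by simp [colGetD, hlen])
      intro j h1 h2
      simp only [colGetD, List.getElem_map, List.getElem_replicate]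
      have hjn : j < n := by simp [colGetD, hlen] at h1; omega
      have hz := hzero j m hjn (le_refl _) hmn
      have hje : NB.getD j [] = NB[j]'(by omega) := by
        rw [List.getD_eq_getElem?_getD, List.getElem?_eq_getElem (by omega : j < NB.length)]; rfl
      rw [hje] at hz
      exact hz
    rw [PySem.List.pyRange_one_cons (by exact_mod_cast hmn), List.foldl_cons,
      hF m NB hmn hlen hrows hcol]
    have hcast : ((m : Int) + 1) = ((m + 1 : Nat) : Int) := by push_cast; ring
    rw [hcast]
    have hlen' : (applyCol NB m (CC m)).length = n := by rw [applyCol_length]; exact hlen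
    have hentry : ∀ j : Nat, j < n →
        (applyCol NB m (CC m)).getD j [] = (NB.getD j []).set m ((CC m).getD j 0) := by
      intro j hj
      rw [List.getD_eq_getElem?_getD,
        List.getElem?_eq_getElem (by omega : j < (applyCol NB m (CC m)).length)]
      rw [Option.getD_some, applyCol_getElem NB m (CC m) j (by omega)]
      congr 1
      rw [List.getD_eq_getElem?_getD, List.getElem?_eq_getElem (by omega : j < NB.length)]
      rfl
    have hrows' : ∀ r ∈ applyCol NB m (CC m), r.length = n := by
      intro r hr
      unfold applyCol at hr
      rcases List.mem_map.mp hr with ⟨j, hj, rfl⟩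
      have hjn : j < n := by simpa [hlen] using List.mem_range.mp hj
      rw [List.length_set]
      have : NB.getD j [] = NB[j]'(by omega) := by
        rw [List.getD_eq_getElem?_getD, List.getElem?_eq_getElem (by omega : j < NB.length)]; rfl
      rw [this]
      exact hrows _ (List.getElem_mem _)
    rw [ih (m + 1) (applyCol NB m (CC m)) (by omega) (by omega) hlen' hrows'
      (by
        intro j i hj hi1 hi2
        rw [hentry j hj, List.getD_eq_getElem?_getD, List.getElem?_set_ne (by omega),
          ← List.getD_eq_getElem?_getD]
        exact hzero j i hj (by omega) hi2)]
    apply List.map_congr_left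
    intro j hj
    have hjn : j < n := List.mem_range.mp hj
    apply List.map_congr_left
    intro i hi
    have hin : i < n := List.mem_range.mp hi
    by_cases h1 : i < m
    · rw [if_pos (by omega), if_pos h1, hentry j hjn, List.getD_eq_getElem?_getD,
        List.getElem?_set_ne (by omega), ← List.getD_eq_getElem?_getD]
    · by_cases h2 : i = m
      · subst h2
        rw [if_pos (by omega), if_neg (by omega), hentry j hjn, List.getD_eq_getElem?_getD]
        have hrl : (NB.getD j []).length = n := by
          have : NB.getD j [] = NB[j]'(by omega) := by
            rw [List.getD_eq_getElem?_getD, List.getElem?_eq_getElem (by omega : j < NB.length)]; rfl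
          rw [this]; exact hrows _ (List.getElem_mem _)
        rw [List.getElem?_set_self (by omega)]
        rfl
      · rw [if_neg (by omega), if_neg (by omega)]

lemma hF_l (n : Nat) (board : List (List Int)) (hb1 : n ≤ board.length)
    (hb2 : ∀ r ∈ board.take n, n ≤ r.length) (m : Nat) (NB : List (List Int)) (hmn : m < n)
    (hlen : NB.length = n) (hz : NB.getD m [] = List.replicate n 0) :
    ((PySem.List.pyRange 0 (n : Int) 1).foldl (gen2DRow 1 board (m : Int)) ((0 : Int), NB)).2
      = NB.set m (compressLine ((board.getD m []).take n) (n : Int)) := by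
  have hmN : m < NB.length := by omega
  have hmb : m < board.length := by omega
  have hrow : n ≤ (board[m]'hmb).length := hb2 _ (mem_take_getElem n board m hmn hb1)
  have hcnt : countNZ ((board[m]'hmb).take n) ≤ n := by
    calc countNZ ((board[m]'hmb).take n) ≤ ((board[m]'hmb).take n).length := countNZ_le _
    _ = n := by rw [List.length_take]; omega
  have hself : NB.set m (NB.getD m []) = NB := by
    rw [board_getD NB m hmN]
    exact List.set_getElem_self hmN
  conv_lhs => rw [← hself]
  rw [loc_row 1 board m NB hmN (PySem.List.pyRange 0 (n : Int) 1) 0 (NB.getD m []), hz,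
    foldl_vals_row 1 board m n hmn hb1 hrow]
  have hinit : ((0 : Int), List.replicate n (0 : Int))
      = ((([] : List Int).length : Int), encode n [] none) := by
    simp [encode_none]
  rw [hinit, state_simL n ((board[m]'hmb).take n) [] none (by intro v hv; cases hv)
    (by simpa [plen] using hcnt)]
  rw [← compress_encode n ((board[m]'hmb).take n) hcnt, board_getD board m hmb]

lemma hF_r (n : Nat) (board : List (List Int)) (hb1 : n ≤ board.length)
    (hb2 : ∀ r ∈ board.take n, n ≤ r.length) (m : Nat) (NB : List (List Int)) (hmn : m < n)
    (hlen : NB.length = n) (hz : NB.getD m [] = List.replicate n 0) :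
    ((PySem.List.pyRange ((n : Int) - 1) (-1) (-1)).foldl (gen2DRow (-1) board (m : Int))
        ((n : Int) - 1, NB)).2
      = NB.set m ((compressLine (((board.getD m []).take n).reverse) (n : Int)).reverse) := by
  have hmN : m < NB.length := by omega
  have hmb : m < board.length := by omega
  have hrow : n ≤ (board[m]'hmb).length := hb2 _ (mem_take_getElem n board m hmn hb1)
  have hcnt : countNZ (((board[m]'hmb).take n).reverse) ≤ n := by
    rw [countNZ_reverse]
    calc countNZ ((board[m]'hmb).take n) ≤ ((board[m]'hmb).take n).length := countNZ_le _
    _ = n := by rw [List.length_take]; omega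
  have hself : NB.set m (NB.getD m []) = NB := by
    rw [board_getD NB m hmN]
    exact List.set_getElem_self hmN
  conv_lhs => rw [← hself]
  rw [loc_row (-1) board m NB hmN _ ((n : Int) - 1) (NB.getD m []), hz,
    foldl_vals_row_rev (-1) board m n hmn hb1 hrow]
  have hinit : ((n : Int) - 1, List.replicate n (0 : Int))
      = ((n : Int) - 1 - (([] : List Int).length : Int), (encode n [] none).reverse) := by
    simp [encode_none]
  rw [hinit, state_simR n (((board[m]'hmb).take n).reverse) [] none (by intro v hv; cases hv)
    (by simpa [plen] using hcnt)]
  rw [← compress_encode n (((board[m]'hmb).take n).reverse) hcnt, board_getD board m hmb]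

lemma hF_u (n : Nat) (board : List (List Int)) (hb1 : n ≤ board.length)
    (hb2 : ∀ r ∈ board.take n, n ≤ r.length) (m : Nat) (NB : List (List Int)) (hmn : m < n)
    (hlen : NB.length = n) (hrows : ∀ r ∈ NB, r.length = n)
    (hcol : colGetD NB m = List.replicate n 0) :
    ((PySem.List.pyRange 0 (n : Int) 1).foldl (gen2DCol 1 board (m : Int)) ((0 : Int), NB)).2
      = applyCol NB m (compressLine (colGetD (Tg n board) m) (n : Int)) := by
  have hrows' : ∀ r ∈ NB, m < r.length := by
    intro r hr; rw [hrows r hr]; omega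
  have hcnt : countNZ (colGetD (Tg n board) m) ≤ n := by
    calc countNZ (colGetD (Tg n board) m) ≤ (colGetD (Tg n board) m).length := countNZ_le _
    _ = n := by rw [colGetD_length, Tg_length n board hb1]
  conv_lhs => rw [← applyCol_self NB m hrows']
  rw [loc_col 1 board m NB hrows' _ 0 (colGetD NB m) (colGetD_length NB m), hcol,
    foldl_vals_col 1 board m n hmn hb1 hb2]
  have hinit : ((0 : Int), List.replicate n (0 : Int))
      = ((([] : List Int).length : Int), encode n [] none) := by
    simp [encode_none]
  rw [hinit, state_simL n (colGetD (Tg n board) m) [] none (by intro v hv; cases hv)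
    (by simpa [plen] using hcnt)]
  rw [← compress_encode n (colGetD (Tg n board) m) hcnt]

lemma hF_d (n : Nat) (board : List (List Int)) (hb1 : n ≤ board.length)
    (hb2 : ∀ r ∈ board.take n, n ≤ r.length) (m : Nat) (NB : List (List Int)) (hmn : m < n)
    (hlen : NB.length = n) (hrows : ∀ r ∈ NB, r.length = n)
    (hcol : colGetD NB m = List.replicate n 0) :
    ((PySem.List.pyRange ((n : Int) - 1) (-1) (-1)).foldl (gen2DCol (-1) board (m : Int))
        ((n : Int) - 1, NB)).2
      = applyCol NB m ((compressLine ((colGetD (Tg n board) m).reverse) (n : Int)).reverse) := by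
  have hrows' : ∀ r ∈ NB, m < r.length := by
    intro r hr; rw [hrows r hr]; omega
  have hcnt : countNZ ((colGetD (Tg n board) m).reverse) ≤ n := by
    rw [countNZ_reverse]
    calc countNZ (colGetD (Tg n board) m) ≤ (colGetD (Tg n board) m).length := countNZ_le _
    _ = n := by rw [colGetD_length, Tg_length n board hb1]
  conv_lhs => rw [← applyCol_self NB m hrows']
  rw [loc_col (-1) board m NB hrows' _ ((n : Int) - 1) (colGetD NB m) (colGetD_length NB m),
    hcol, foldl_vals_col_rev (-1) board m n hmn hb1 hb2]
  have hinit : ((n : Int) - 1, List.replicate n (0 : Int))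
      = ((n : Int) - 1 - (([] : List Int).length : Int), (encode n [] none).reverse) := by
    simp [encode_none]
  rw [hinit, state_simR n ((colGetD (Tg n board) m).reverse) [] none (by intro v hv; cases hv)
    (by simpa [plen] using hcnt)]
  rw [← compress_encode n ((colGetD (Tg n board) m).reverse) hcnt]

lemma aStepU_eq : aStepU = gen2DCol 1 := rfl

lemma aStepL_eq : aStepL = gen2DRow 1 := rfl

lemma aStepD_eq : aStepD = gen2DCol (-1) := rfl

lemma aStepR_eq : aStepR = gen2DRow (-1) := rfl

lemma new0_eq (n : Nat) :
    (PySem.List.pyRange 0 (n : Int) 1).map (fun _ => PySem.List.pyRepeat [(0 : Int)] (n : Int))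
      = Zg n := by
  rw [List.map_const', PySem.List.length_pyRange_one]
  simp [Zg, PySem.List.pyRepeat_singleton]

lemma moveA_l (n : Nat) (board : List (List Int)) (hb1 : n ≤ board.length)
    (hb2 : ∀ r ∈ board.take n, n ≤ r.length) :
    moveA (n : Int) board "l"
      = (List.range n).map (fun i => compressLine ((board.getD i []).take n) (n : Int)) := by
  unfold moveA
  rw [if_neg (by decide), if_neg (by decide), if_pos rfl, new0_eq n, aStepL_eq]
  have houter := outer_rows n
    (fun nb i => ((PySem.List.pyRange 0 (n : Int) 1).foldl (gen2DRow 1 board i) ((0 : Int), nb)).2)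
    (fun m => compressLine ((board.getD m []).take n) (n : Int))
    (fun m NB h1 h2 h3 => hF_l n board hb1 hb2 m NB h1 h2 h3)
    n 0 (Zg n) (by omega) (by omega) (by simp [Zg])
    (fun j _ hj => Zg_getD n j hj)
  norm_num at houter
  rw [houter]
  simp only [List.getD_eq_getElem?_getD]

lemma moveA_r (n : Nat) (board : List (List Int)) (hb1 : n ≤ board.length)
    (hb2 : ∀ r ∈ board.take n, n ≤ r.length) :
    moveA (n : Int) board "r"
      = (List.range n).map (fun i =>
          (compressLine (((board.getD i []).take n).reverse) (n : Int)).reverse) := by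
  unfold moveA
  rw [if_neg (by decide), if_neg (by decide), if_neg (by decide), if_pos rfl, new0_eq n,
    aStepR_eq]
  have houter := outer_rows n
    (fun nb i => ((PySem.List.pyRange ((n : Int) - 1) (-1) (-1)).foldl (gen2DRow (-1) board i)
      ((n : Int) - 1, nb)).2)
    (fun m => (compressLine (((board.getD m []).take n).reverse) (n : Int)).reverse)
    (fun m NB h1 h2 h3 => hF_r n board hb1 hb2 m NB h1 h2 h3)
    n 0 (Zg n) (by omega) (by omega) (by simp [Zg])
    (fun j _ hj => Zg_getD n j hj)
  norm_num at houter
  rw [houter]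
  simp only [List.getD_eq_getElem?_getD]

lemma moveA_u (n : Nat) (board : List (List Int)) (hb1 : n ≤ board.length)
    (hb2 : ∀ r ∈ board.take n, n ≤ r.length) :
    moveA (n : Int) board "u"
      = (List.range n).map (fun j => (List.range n).map (fun i =>
          (compressLine (colGetD (Tg n board) i) (n : Int)).getD j 0)) := by
  unfold moveA
  rw [if_pos rfl, new0_eq n, aStepU_eq]
  have houter := outer_cols n
    (fun nb i => ((PySem.List.pyRange 0 (n : Int) 1).foldl (gen2DCol 1 board i) ((0 : Int), nb)).2)
    (fun m => compressLine (colGetD (Tg n board) m) (n : Int))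
    (fun m NB h1 h2 h3 h4 => hF_u n board hb1 hb2 m NB h1 h2 h3 h4)
    n 0 (Zg n) (by omega) (by omega) (by simp [Zg]) (by simp [Zg])
    (by
      intro j i hj _ hi
      rw [Zg_getD n j hj, List.getD_replicate _ hi])
  norm_num at houter
  rw [houter]
  simp only [List.getD_eq_getElem?_getD]

lemma moveA_d (n : Nat) (board : List (List Int)) (hb1 : n ≤ board.length)
    (hb2 : ∀ r ∈ board.take n, n ≤ r.length) :
    moveA (n : Int) board "d"
      = (List.range n).map (fun j => (List.range n).map (fun i =>
          ((compressLine ((colGetD (Tg n board) i).reverse) (n : Int)).reverse).getD j 0)) := by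
  unfold moveA
  rw [if_neg (by decide), if_pos rfl, new0_eq n, aStepD_eq]
  have houter := outer_cols n
    (fun nb i => ((PySem.List.pyRange ((n : Int) - 1) (-1) (-1)).foldl (gen2DCol (-1) board i)
      ((n : Int) - 1, nb)).2)
    (fun m => (compressLine ((colGetD (Tg n board) m).reverse) (n : Int)).reverse)
    (fun m NB h1 h2 h3 h4 => hF_d n board hb1 hb2 m NB h1 h2 h3 h4)
    n 0 (Zg n) (by omega) (by omega) (by simp [Zg]) (by simp [Zg])
    (by
      intro j i hj _ hi
      rw [Zg_getD n j hj, List.getD_replicate _ hi])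
  norm_num at houter
  rw [houter]
  simp only [List.getD_eq_getElem?_getD]

lemma pyRange_map_eq {α : Type} (n : Nat) (f : Int → α) :
    (PySem.List.pyRange 0 (n : Int) 1).map f = (List.range n).map (fun k : Nat => f (k : Int)) := by
  rw [PySem.List.pyRange_zero_nat n, List.map_map]
  rfl

lemma board_map_range {α : Type} (n : Nat) (board : List (List Int)) (hb1 : board.length = n)
    (f : List Int → α) :
    board.map f = (List.range n).map (fun i => f (board.getD i [])) := by
  apply List.ext_getElem (by simp [hb1])
  intro j h1 h2
  simp only [List.getElem_map, List.getElem_range]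
  congr 1
  rw [board_getD board j (by simp at h2; omega)]

lemma pyGetD_map_range {α : Type} (g : Nat → α) (n i : Nat) (d : α) (hi : i < n) :
    PySem.List.pyGetD ((List.range n).map g) (i : Int) d = g i := by
  rw [PySem.List.pyGetD_natCast, PySem.List.getD_map_range g n i d hi]

lemma map_vals_col_range (board : List (List Int)) (k n : Nat) (hb1 : board.length = n) :
    (List.range n).map (fun j : Nat => pvGet2 board (j : Int) (k : Int)) = colGetD board k := by
  rw [← pyRange_map_eq n (fun j => pvGet2 board j (k : Int))]
  exact map_vals_col board k n hb1

lemma map_vals_col_rev (board : List (List Int)) (k n : Nat) (hb1 : board.length = n) :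
    (PySem.List.pyRange ((n : Int) - 1) (-1) (-1)).map (fun j => pvGet2 board j (k : Int))
      = (colGetD board k).reverse := by
  rw [pyRange_rev, List.map_reverse, map_vals_col board k n hb1]

lemma rev_getD (l : List Int) (n : Nat) (hl : l.length = n) (j : Nat) (hj : j < n) :
    l.reverse.getD j 0 = l.getD (n - 1 - j) 0 := by
  rw [List.getD_eq_getElem?_getD, List.getD_eq_getElem?_getD,
    List.getElem?_eq_getElem (by simp [hl]; omega),
    List.getElem?_eq_getElem (by omega : n - 1 - j < l.length)]
  simp [List.getElem_reverse, hl]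

lemma grid_eq (n : Nat) (board : List (List Int)) :
    (PySem.List.slice board none (some (n : Int))).map
      (fun row => PySem.List.slice row none (some (n : Int))) = Tg n board := by
  rw [PySem.List.slice_to_natCast]
  unfold Tg
  apply List.map_congr_left
  intro r _
  rw [PySem.List.slice_to_natCast]

lemma moveB_l (n : Nat) (board : List (List Int)) (hb1 : n ≤ board.length) :
    moveB (n : Int) board "l"
      = (List.range n).map (fun i => compressLine ((board.getD i []).take n) (n : Int)) := by
  unfold moveB
  rw [if_pos rfl, grid_eq n board,
    board_map_range n (Tg n board) (Tg_length n board hb1) _]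
  apply List.map_congr_left
  intro i hi
  rw [Tg_getD n board i (List.mem_range.mp hi) hb1]

lemma moveB_r (n : Nat) (board : List (List Int)) (hb1 : n ≤ board.length) :
    moveB (n : Int) board "r"
      = (List.range n).map (fun i =>
          (compressLine (((board.getD i []).take n).reverse) (n : Int)).reverse) := by
  unfold moveB
  rw [if_neg (by decide), if_pos rfl, grid_eq n board,
    board_map_range n (Tg n board) (Tg_length n board hb1) _]
  apply List.map_congr_left
  intro i hi
  rw [Tg_getD n board i (List.mem_range.mp hi) hb1]

lemma moveB_u (n : Nat) (board : List (List Int)) (hb1 : n ≤ board.length) :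
    moveB (n : Int) board "u"
      = (List.range n).map (fun j => (List.range n).map (fun i =>
          (compressLine (colGetD (Tg n board) i) (n : Int)).getD j 0)) := by
  unfold moveB
  rw [if_neg (by decide), if_neg (by decide), if_pos rfl, grid_eq n board]
  have hmv : ∀ k : Nat,
      (List.range n).map (fun j : Nat => pvGet2 (Tg n board) (j : Int) (k : Int))
      = colGetD (Tg n board) k :=
    fun k => map_vals_col_range (Tg n board) k n (Tg_length n board hb1)
  simp only [pyRange_map_eq, hmv]
  apply List.map_congr_left
  intro j hj
  apply List.map_congr_left
  intro i hi
  rw [pyGetD_map_range _ n i [] (List.mem_range.mp hi),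
    PySem.List.pyGetD_natCast]

lemma moveB_d (n : Nat) (board : List (List Int)) (hb1 : n ≤ board.length) :
    moveB (n : Int) board "d"
      = (List.range n).map (fun j => (List.range n).map (fun i =>
          ((compressLine ((colGetD (Tg n board) i).reverse) (n : Int)).reverse).getD j 0)) := by
  unfold moveB
  rw [if_neg (by decide), if_neg (by decide), if_neg (by decide), if_pos rfl, grid_eq n board]
  have hmv : ∀ k : Nat,
      (PySem.List.pyRange ((n : Int) - 1) (-1) (-1)).map
        (fun j => pvGet2 (Tg n board) j (k : Int))
      = (colGetD (Tg n board) k).reverse :=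
    fun k => map_vals_col_rev (Tg n board) k n (Tg_length n board hb1)
  simp only [pyRange_map_eq, hmv]
  apply List.map_congr_left
  intro j hj
  have hjn : j < n := List.mem_range.mp hj
  apply List.map_congr_left
  intro i hi
  have hin : i < n := List.mem_range.mp hi
  rw [pyGetD_map_range _ n i [] hin]
  have hcast : ((n : Int) - 1 - (j : Int)) = ((n - 1 - j : Nat) : Int) := by push_cast; omega
  rw [hcast, PySem.List.pyGetD_natCast]
  have hlen : (compressLine ((colGetD (Tg n board) i).reverse) (n : Int)).length = n := by
    apply compress_len
    rw [countNZ_reverse]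
    calc countNZ (colGetD (Tg n board) i) ≤ (colGetD (Tg n board) i).length := countNZ_le _
    _ = n := by rw [colGetD_length, Tg_length n board hb1]
  rw [rev_getD _ n hlen j hjn]

lemma row_len_l (n : Nat) (board : List (List Int)) (hb1 : n ≤ board.length)
    (hb2 : ∀ r ∈ board.take n, n ≤ r.length) (i : Nat) (hi : i < n) :
    (compressLine ((board.getD i []).take n) (n : Int)).length = n := by
  rw [board_getD board i (by omega)]
  apply compress_len
  calc countNZ ((board[i]'(by omega)).take n) ≤ ((board[i]'(by omega)).take n).length :=
      countNZ_le _
  _ ≤ n := by rw [List.length_take]; omega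

lemma row_len_r (n : Nat) (board : List (List Int)) (hb1 : n ≤ board.length)
    (hb2 : ∀ r ∈ board.take n, n ≤ r.length) (i : Nat) (hi : i < n) :
    ((compressLine (((board.getD i []).take n).reverse) (n : Int)).reverse).length = n := by
  rw [List.length_reverse, board_getD board i (by omega)]
  apply compress_len
  rw [countNZ_reverse]
  calc countNZ ((board[i]'(by omega)).take n) ≤ ((board[i]'(by omega)).take n).length :=
      countNZ_le _
  _ ≤ n := by rw [List.length_take]; omega

lemma fmb_eq : ∀ (fuel : Nat) (n : Nat) (board : List (List Int)), n ≤ board.length →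
    (∀ r ∈ board.take n, n ≤ r.length) →
    fmbA fuel (n : Int) board = fmbB fuel (n : Int) board := by
  intro fuel
  induction fuel with
  | zero => intros; rfl
  | succ fuel ih =>
    intro n board hb1 hb2
    have hu : moveA (n : Int) board "u" = moveB (n : Int) board "u" := by
      rw [moveA_u n board hb1 hb2, moveB_u n board hb1]
    have hd : moveA (n : Int) board "d" = moveB (n : Int) board "d" := by
      rw [moveA_d n board hb1 hb2, moveB_d n board hb1]
    have hl : moveA (n : Int) board "l" = moveB (n : Int) board "l" := by
      rw [moveA_l n board hb1 hb2, moveB_l n board hb1]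
    have hr : moveA (n : Int) board "r" = moveB (n : Int) board "r" := by
      rw [moveA_r n board hb1 hb2, moveB_r n board hb1]
    have s_u : n ≤ (moveB (n : Int) board "u").length ∧
        ∀ r ∈ (moveB (n : Int) board "u").take n, n ≤ r.length := by
      rw [moveB_u n board hb1]
      refine ⟨by simp, ?_⟩
      intro r hr'
      rcases List.mem_map.mp (List.mem_of_mem_take hr') with ⟨j, _, rfl⟩
      simp
    have s_d : n ≤ (moveB (n : Int) board "d").length ∧
        ∀ r ∈ (moveB (n : Int) board "d").take n, n ≤ r.length := by
      rw [moveB_d n board hb1]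
      refine ⟨by simp, ?_⟩
      intro r hr'
      rcases List.mem_map.mp (List.mem_of_mem_take hr') with ⟨j, _, rfl⟩
      simp
    have s_l : n ≤ (moveB (n : Int) board "l").length ∧
        ∀ r ∈ (moveB (n : Int) board "l").take n, n ≤ r.length := by
      rw [moveB_l n board hb1]
      refine ⟨by simp, ?_⟩
      intro r hr'
      rcases List.mem_map.mp (List.mem_of_mem_take hr') with ⟨j, hj, rfl⟩
      rw [row_len_l n board hb1 hb2 j (List.mem_range.mp hj)]
    have s_r : n ≤ (moveB (n : Int) board "r").length ∧
        ∀ r ∈ (moveB (n : Int) board "r").take n, n ≤ r.length := by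
      rw [moveB_r n board hb1]
      refine ⟨by simp, ?_⟩
      intro r hr'
      rcases List.mem_map.mp (List.mem_of_mem_take hr') with ⟨j, hj, rfl⟩
      rw [row_len_r n board hb1 hb2 j (List.mem_range.mp hj)]
    simp only [fmbA, fmbB, List.foldl_cons, List.foldl_nil]
    rw [hu, hd, hl, hr,
      ih n _ s_u.1 s_u.2, ih n _ s_d.1 s_d.2, ih n _ s_l.1 s_l.2, ih n _ s_r.1 s_r.2]

theorem main_eq (size : Int) (board : List (List Int)) (depth : Int)
    (hpre : 0 ≤ depth ∧
      ((depth = 0 ∧ board ≠ [] ∧ ∀ r ∈ board, r ≠ []) ∨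
        (1 ≤ depth ∧ 1 ≤ size ∧ size ≤ (board.length : Int) ∧
          ∀ r ∈ board.take size.toNat, size ≤ (r.length : Int)))) :
    find_maximum_block size board depth = find_maximum_block_alt size board depth := by
  obtain ⟨hd, hcase⟩ := hpre
  rcases hcase with ⟨h0, -, -⟩ | ⟨-, h1, hlen, hrows⟩
  · subst h0
    rfl
  · unfold find_maximum_block find_maximum_block_alt
    have hsz : ((size.toNat : Nat) : Int) = size := Int.toNat_of_nonneg (by omega)
    have hb1 : size.toNat ≤ board.length := by omega
    have hb2 : ∀ r ∈ board.take size.toNat, size.toNat ≤ r.length := by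
      intro r hr'
      have := hrows r hr'
      omega
    calc fmbA depth.toNat size board
        = fmbA depth.toNat ((size.toNat : Nat) : Int) board := by rw [hsz]
      _ = fmbB depth.toNat ((size.toNat : Nat) : Int) board := fmb_eq _ _ _ hb1 hb2
      _ = fmbB depth.toNat ((size.toNat : Nat) : Int) board := rfl
      _ = fmbB depth.toNat size board := by rw [hsz]

-- ===== VERDICT (by name: the statement is the Claim_ definition above) =====
theorem find_maximum_block_spec : Claim_equal_find_maximum_block := by
  intro size board depth _ hpre
  unfold Spec_find_maximum_block
  exact main_eq size board depth hpre
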